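-- pv_equiv track=rewrite | github.com/desmondblue/Python_Programs | infytq/PF/PF-Assgn50.py | sms_encoding
-- ===== SOURCE A (Python) =====
-- def sms_encoding(data):
--     #start writing your code here
--     list = data.split(" ")
--     for i in range(0,len(list)):
--         flag =0
--         text =''
--         for j in list[i]:
--             j=j.lower()
--             if j not in 'aeiou':
--                 flag =1
--                 break
--         if flag ==1:
--             for j in list[i]:
--                 if j.lower() not in 'aeiou':
--                     text+=j
--             list[i]= text
--     data = ' '.join(list)
--     return data
-- ===== SOURCE B (Python) =====
-- def sms_encoding(data):
--     # single streaming pass: a small state machine over characters, no split/join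
--     out = []
--     orig = []   # chars of the current word
--     filt = []   # same chars minus vowels
--     for c in data:
--         if c == ' ':
--             out.extend(filt if filt else orig)
--             out.append(' ')
--             orig = []
--             filt = []
--         else:
--             orig.append(c)
--             if c.lower() not in 'aeiou':
--                 filt.append(c)
--     out.extend(filt if filt else orig)
--     return ''.join(out)
-- ===== Notes on version B (the rewrite author's own statement) =====
-- stated objective: alternative
-- what changed: Replaces A's split-into-words plus two per-word passes (a consonant pre-scan with break, then a vowel-filter pass) and a final join with a single streaming pass over the characters: a small state machine that carries the emitted output, the current word and its vowel-free form, flushing the latter (or the original word if it is empty) at each space and at the end.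
import Mathlib
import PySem

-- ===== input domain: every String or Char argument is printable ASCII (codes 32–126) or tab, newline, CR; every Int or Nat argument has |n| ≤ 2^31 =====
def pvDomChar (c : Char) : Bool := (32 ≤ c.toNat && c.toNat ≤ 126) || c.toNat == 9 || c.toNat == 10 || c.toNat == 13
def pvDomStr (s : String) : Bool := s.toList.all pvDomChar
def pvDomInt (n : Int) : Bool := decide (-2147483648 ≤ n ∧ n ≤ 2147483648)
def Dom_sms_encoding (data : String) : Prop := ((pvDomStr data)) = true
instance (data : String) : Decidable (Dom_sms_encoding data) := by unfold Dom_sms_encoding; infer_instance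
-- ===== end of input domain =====

-- B rewrites A's split / per-word two-pass (consonant pre-scan with break, then a filter pass) / join
-- as ONE streaming character pass over the whole string (a small state machine); same return value.

-- ===== PORT A =====
-- A's inner pre-scan loop with break: flag = 1 iff some char's lower() is not a vowel
def pvAFlag : List Char → Bool
  | [] => false
  | j :: rest =>
      if (PySem.Chars.lowerChar j) ∈ ['a', 'e', 'i', 'o', 'u'] then pvAFlag rest else true

-- A's second per-word loop: text += j whenever j.lower() is not a vowel
def pvAText (w : List Char) : List Char :=
  w.foldl (fun text j => if (PySem.Chars.lowerChar j) ∈ ['a', 'e', 'i', 'o', 'u'] then text else text ++ [j]) []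

def sms_encoding (data : String) : String :=
  let ws := PySem.Chars.splitOn data.toList [' ']        -- data.split(" ")
  let ws := ws.map (fun w => if pvAFlag w then pvAText w else w)  -- the index loop rewrites list[i]
  String.ofList (PySem.Chars.join [' '] ws)              -- ' '.join(list)

-- ===== PORT B =====
-- one step of B's streaming state machine: state = (emitted output, current word, current word minus vowels)
def pvBStep (st : List Char × List Char × List Char) (c : Char) : List Char × List Char × List Char :=
  let (out, orig, filt) := st
  if c = ' ' then
    (out ++ (if filt.isEmpty then orig else filt) ++ [' '], [], [])
  else
    (out, orig ++ [c], if (PySem.Chars.lowerChar c) ∈ ['a', 'e', 'i', 'o', 'u'] then filt else filt ++ [c])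

def sms_encoding_alt (data : String) : String :=
  let st := data.toList.foldl pvBStep ([], [], [])
  String.ofList (st.1 ++ (if st.2.2.isEmpty then st.2.1 else st.2.2))

-- ===== PRECONDITION & SPEC =====
def Spec_sms_encoding (data : String) (out : String) : Prop := out = sms_encoding_alt data
instance (data : String) (out : String) : Decidable (Spec_sms_encoding data out) := by unfold Spec_sms_encoding; infer_instance

-- ===== CLAIM (what is proved, stated in full; the proofs are below) =====
def Claim_equal_sms_encoding : Prop := ∀ (data : String), Dom_sms_encoding data → Spec_sms_encoding data (sms_encoding data)

-- ===== LEMMAS AND PROOFS =====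

-- proof-side: the final flush B performs (also after each space)
def pvFlush (st : List Char × List Char × List Char) : List Char :=
  st.1 ++ (if st.2.2.isEmpty then st.2.1 else st.2.2)

-- the shared keep-test, proof-side only
def pvKeep (c : Char) : Bool := !((PySem.Chars.lowerChar c) ∈ ['a', 'e', 'i', 'o', 'u'])

-- B's per-word value, proof-side normal form
def pvF (w : List Char) : List Char := if (w.filter pvKeep).isEmpty then w else w.filter pvKeep

theorem pvAFlag_eq_any (w : List Char) : pvAFlag w = w.any pvKeep := by
  induction w with
  | nil => rfl
  | cons j rest ih => by_cases h : (PySem.Chars.lowerChar j) ∈ ['a','e','i','o','u'] <;>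
      simp [pvAFlag, pvKeep, h, ih]

theorem pvAText_eq_filter (w : List Char) : pvAText w = w.filter pvKeep := by
  suffices h : ∀ acc : List Char,
      w.foldl (fun text j => if (PySem.Chars.lowerChar j) ∈ ['a','e','i','o','u'] then text else text ++ [j]) acc
        = acc ++ w.filter pvKeep by
    simpa [pvAText] using h []
  induction w with
  | nil => simp
  | cons j rest ih =>
      intro acc
      rw [List.foldl_cons]
      by_cases h : (PySem.Chars.lowerChar j) ∈ ['a','e','i','o','u'] <;>
        [rw [if_pos h, ih]; rw [if_neg h, ih]] <;>
        simp [pvKeep, h]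

theorem pvAWord_eq_pvF (w : List Char) :
    (if pvAFlag w then pvAText w else w) = pvF w := by
  rw [pvAFlag_eq_any, pvAText_eq_filter, pvF]
  rcases h : w.any pvKeep with _ | _
  · have : w.filter pvKeep = [] := by
      simp only [List.any_eq_false] at h
      rw [List.filter_eq_nil_iff]
      intro a ha
      simp [h a ha]
    simp [this]
  · have : (w.filter pvKeep).isEmpty = false := by
      simp only [List.any_eq_true] at h
      obtain ⟨x, hx, hk⟩ := h
      rw [List.isEmpty_eq_false_iff]
      exact List.ne_nil_of_mem (List.mem_filter.mpr ⟨hx, hk⟩)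
    simp [this]

-- PySem's fuel-based splitOn on a single-char separator is List.splitOnP
theorem pvSplitOn_go_single (c : Char) :
    ∀ fuel (l cur : List Char) (accs : List (List Char)), l.length < fuel →
      PySem.Chars.splitOn.go [c] fuel l cur accs
        = accs.reverse ++ List.modifyHead (cur.reverse ++ ·) (l.splitOnP (· == c)) := by
  intro fuel
  induction fuel with
  | zero => intro l cur accs h; omega
  | succ f ih =>
      intro l cur accs h
      cases l with
      | nil => simp [PySem.Chars.splitOn.go, List.splitOnP_nil]
      | cons ch rest =>
          rw [PySem.Chars.splitOn.go]
          by_cases hc : ch = c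
          · have hpre : [c].isPrefixOf (ch :: rest) = true := by simp [List.isPrefixOf, hc]
            rw [if_pos hpre]
            have hdrop : List.drop [c].length (ch :: rest) = rest := by simp
            rw [hdrop]
            rw [ih rest [] (cur.reverse :: accs) (by simp at h ⊢; omega)]
            simp [List.splitOnP_cons, hc, List.modifyHead]
            cases rest.splitOnP (fun x => x == c) <;> rfl
          · have hpre : [c].isPrefixOf (ch :: rest) = false := by
              simp [List.isPrefixOf]
              exact fun h' => hc h'.symm
            rw [if_neg (by simp [hpre])]
            rw [ih rest (ch :: cur) accs (by simp at h ⊢; omega)]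
            rw [List.splitOnP_cons]
            simp only [beq_iff_eq, if_neg hc, List.modifyHead_modifyHead]
            congr 1
            cases hsp : rest.splitOnP (· == c) with
            | nil => exact absurd hsp (List.splitOnP_ne_nil _ _)
            | cons x xs => simp [List.modifyHead]

theorem pvSplitOn_single (cs : List Char) (c : Char) :
    PySem.Chars.splitOn cs [c] = cs.splitOnP (· == c) := by
  rw [PySem.Chars.splitOn, pvSplitOn_go_single c (cs.length + 1) cs [] [] (by omega)]
  cases hsp : cs.splitOnP (· == c) with
  | nil => exact absurd hsp (List.splitOnP_ne_nil _ _)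
  | cons x xs => simp [List.modifyHead]

-- the whole of B's fold + final flush, against the splitOnP decomposition of the input
theorem pvB_fold_spec (cs : List Char) :
    ∀ (out orig : List Char),
      pvFlush (cs.foldl pvBStep (out, orig, orig.filter pvKeep))
      = out ++ List.intercalate [' ']
          ((List.modifyHead (orig ++ ·) (cs.splitOnP (· == ' '))).map pvF) := by
  induction cs with
  | nil =>
      intro out orig
      simp [List.splitOnP_nil, List.modifyHead, List.intercalate, pvF, pvFlush]
  | cons c rest ih =>
      intro out orig
      by_cases hc : c = ' '
      · subst hc
        have hstep : pvBStep (out, orig, orig.filter pvKeep) ' '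
            = (out ++ (if (orig.filter pvKeep).isEmpty then orig else orig.filter pvKeep) ++ [' '], [], []) := by
          simp [pvBStep]
        rw [List.foldl_cons, hstep]
        have := ih (out ++ (if (orig.filter pvKeep).isEmpty then orig else orig.filter pvKeep) ++ [' ']) []
        simp only [List.filter_nil] at this
        rw [this]
        rw [List.splitOnP_cons]
        simp only [beq_self_eq_true, if_true]
        have hmod : List.modifyHead (orig ++ ·) ([] :: rest.splitOnP (· == ' '))
            = orig :: rest.splitOnP (· == ' ') := by simp [List.modifyHead]
        have hmod2 : List.modifyHead (([] : List Char) ++ ·) (rest.splitOnP (· == ' '))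
            = rest.splitOnP (· == ' ') := by
          cases h : rest.splitOnP (· == ' ') <;> simp [List.modifyHead]
        rw [hmod, hmod2]
        cases hsp : rest.splitOnP (· == ' ') with
        | nil => exact absurd hsp (List.splitOnP_ne_nil _ _)
        | cons x xs =>
            simp only [List.map_cons]
            simp [pvF, List.intercalate, List.intersperse, List.isEmpty_iff, List.filter_eq_nil_iff]
      · have hstep : pvBStep (out, orig, orig.filter pvKeep) c
            = (out, orig ++ [c], (orig ++ [c]).filter pvKeep) := by
          simp only [pvBStep, if_neg hc]
          by_cases hk : (PySem.Chars.lowerChar c) ∈ ['a','e','i','o','u'] <;>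
            simp [hk, pvKeep, List.filter_append]
        rw [List.foldl_cons, hstep, ih out (orig ++ [c])]
        rw [List.splitOnP_cons]
        simp only [beq_iff_eq, if_neg hc, List.modifyHead_modifyHead]
        congr 2
        cases hsp : rest.splitOnP (· == ' ') with
        | nil => exact absurd hsp (List.splitOnP_ne_nil _ _)
        | cons x xs => simp [List.modifyHead]

-- A in the same normal form
theorem pvA_spec (cs : List Char) :
    PySem.Chars.join [' '] ((PySem.Chars.splitOn cs [' ']).map (fun w => if pvAFlag w then pvAText w else w))
      = List.intercalate [' '] ((cs.splitOnP (· == ' ')).map pvF) := by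
  rw [pvSplitOn_single, PySem.Chars.join]
  congr 1
  exact List.map_congr_left (fun w _ => pvAWord_eq_pvF w)

-- ===== VERDICT (by name: the statement is the Claim_ definition above) =====
theorem sms_encoding_spec : Claim_equal_sms_encoding := by
  intro data _
  unfold Spec_sms_encoding
  show String.ofList (PySem.Chars.join [' ']
        ((PySem.Chars.splitOn data.toList [' ']).map (fun w => if pvAFlag w then pvAText w else w)))
      = String.ofList (pvFlush (List.foldl pvBStep ([], [], []) data.toList))
  have hB := pvB_fold_spec data.toList [] []
  simp only [List.filter_nil] at hB
  have hmod : List.modifyHead (([] : List Char) ++ ·) (data.toList.splitOnP (· == ' '))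
      = data.toList.splitOnP (· == ' ') := by
    cases h : data.toList.splitOnP (· == ' ') <;> simp [List.modifyHead]
  rw [hmod] at hB
  rw [hB, pvA_spec]
  simp
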